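-- pv_equiv track=rewrite | github.com/nathankelley/TypeRacer | racer.py | calculate_words
-- ===== SOURCE A (Python) =====
-- def calculate_words(string1, string2):
--     counter = 0
--     spaces = 0
--     for i in string1:
--         if i == string2[counter]:
--             counter += 1
--             if i == " ":
--                 spaces += 1
--         else:
--             # once we've hit a wrong letter we stop the increments
--             break
--     # The space is added after the word is completed, so returning the number of spaces from the correct string list will
--     # guarantee that we have the number of total words completed.
--     return spaces
-- ===== SOURCE B (Python) =====
-- def calculate_words(string1, string2):
--     n = len(string1)
--     prefix = next((i for i in range(n) if string1[i] != string2[i]), n)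
--     return string1[:prefix].count(' ')
-- ===== Notes on version B (the rewrite author's own statement) =====
-- stated objective: simpler
-- what changed: A's single loop that maintains counter and spaces state inline is replaced by computing the first-divergence index with a generator/next pass and then a separate str.count(' ') over the matched prefix.
import Mathlib
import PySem

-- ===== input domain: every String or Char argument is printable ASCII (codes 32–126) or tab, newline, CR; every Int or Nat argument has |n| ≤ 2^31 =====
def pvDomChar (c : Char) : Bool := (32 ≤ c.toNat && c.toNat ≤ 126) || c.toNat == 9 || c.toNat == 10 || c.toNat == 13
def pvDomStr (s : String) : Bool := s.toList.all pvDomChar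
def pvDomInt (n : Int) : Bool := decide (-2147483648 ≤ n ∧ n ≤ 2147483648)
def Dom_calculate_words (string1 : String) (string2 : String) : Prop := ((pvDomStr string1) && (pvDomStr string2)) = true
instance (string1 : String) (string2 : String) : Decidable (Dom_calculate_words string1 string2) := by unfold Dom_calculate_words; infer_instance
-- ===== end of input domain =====

-- B replaces A's inline counting loop by a find-first-mismatch pass followed by a
-- separate str.count(' ') over the matched prefix (simpler decomposition, same cost).

-- ===== PORT A =====
-- A's for-loop over string1 with its running counter/spaces state.
def pvLoopA (s2 : List Char) : List Char → Nat → Int → Int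
  | [], _, spaces => spaces
  | c :: rest, counter, spaces =>
    match PySem.List.pyGet? s2 (counter : Int) with
    | none => 0   -- string2[counter] raises IndexError here; excluded by Pre_
    | some d =>
      if c = d then
        pvLoopA s2 rest (counter + 1) (if c = ' ' then spaces + 1 else spaces)
      else spaces

def calculate_words (string1 : String) (string2 : String) : Int :=
  pvLoopA string2.toList string1.toList 0 0

-- ===== PORT B =====
-- B's generator: first index i with string1[i] != string2[i], defaulting to len(string1).
def pvFirstDiff (s2 : List Char) : List Char → Nat → Nat
  | [], k => k
  | c :: rest, k =>
    match PySem.List.pyGet? s2 (k : Int) with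
    | none => k   -- string2[i] raises IndexError here; excluded by Pre_
    | some d => if c ≠ d then k else pvFirstDiff s2 rest (k + 1)

def calculate_words_alt (string1 : String) (string2 : String) : Int :=
  let pfx := pvFirstDiff string2.toList string1.toList 0
  (PySem.Str.count (PySem.Str.slice string1 none (some (pfx : Int))) " " : Int)

-- ===== PRECONDITION & SPEC =====
-- Pre_ excludes exactly the inputs where A (and B alike) raises IndexError:
-- string2 a proper prefix of string1, so that string2[counter] is read out of range.
def Pre_calculate_words (string1 : String) (string2 : String) : Prop :=
  string2.toList <+: string1.toList → string1.toList.length ≤ string2.toList.length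
instance (string1 : String) (string2 : String) : Decidable (Pre_calculate_words string1 string2) := by
  unfold Pre_calculate_words; infer_instance

def pvWitness_calculate_words : String × String := ("ab cd", "ab c!x")

def Spec_calculate_words (string1 : String) (string2 : String) (out : Int) : Prop := out = calculate_words_alt string1 string2
instance (string1 : String) (string2 : String) (out : Int) : Decidable (Spec_calculate_words string1 string2 out) := by unfold Spec_calculate_words; infer_instance

-- ===== CLAIM (what is proved, stated in full; the proofs are below) =====
def Claim_equal_calculate_words : Prop := ∀ (string1 : String) (string2 : String), Dom_calculate_words string1 string2 → Pre_calculate_words string1 string2 → Spec_calculate_words string1 string2 (calculate_words string1 string2)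

-- ===== LEMMAS AND PROOFS =====

-- Structural twins of the two loops, recursing on the remaining part of string2.
def pvLoopA' : List Char → List Char → Int → Int
  | _, [], sp => sp
  | [], _ :: _, _ => 0
  | d :: r2, c :: r1, sp => if c = d then pvLoopA' r2 r1 (if c = ' ' then sp + 1 else sp) else sp

def pvFD' : List Char → List Char → Nat
  | _, [] => 0
  | [], _ :: _ => 0
  | d :: r2, c :: r1 => if c = d then pvFD' r2 r1 + 1 else 0

lemma pvDropCons {s2 r2 : List Char} {d : Char} {k : Nat} (h : s2.drop k = d :: r2) :
    s2[k]? = some d ∧ s2.drop (k + 1) = r2 := by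
  constructor
  · have h' : (List.drop k s2)[0]? = s2[k + 0]? := List.getElem?_drop
    rw [h] at h'; simpa using h'.symm
  · rw [← List.drop_drop (i := 1) (j := k), h, List.drop_one, List.tail_cons]

lemma pvDropNil {s2 : List Char} {k : Nat} (h : s2.drop k = []) : s2[k]? = none :=
  List.getElem?_eq_none (by have := List.drop_eq_nil_iff.mp h; omega)

lemma pvLoopA_drop (s2 : List Char) : ∀ (l1 : List Char) (k : Nat) (sp : Int),
    pvLoopA s2 l1 k sp = pvLoopA' (s2.drop k) l1 sp := by
  intro l1
  induction l1 with
  | nil => intro k sp; cases s2.drop k <;> rfl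
  | cons c rest ih =>
    intro k sp
    have hget : PySem.List.pyGet? s2 (k : Int) = s2[k]? := by simp [pysem]
    rcases h : s2.drop k with _ | ⟨d, r2⟩
    · simp [pvLoopA, pvLoopA', hget, pvDropNil h]
    · obtain ⟨h0, h1⟩ := pvDropCons h
      simp only [pvLoopA, pvLoopA', hget, h0]
      by_cases hc : c = d
      · simp [hc, ih (k + 1), h1]
      · simp [hc]

lemma pvFirstDiff_drop (s2 : List Char) : ∀ (l1 : List Char) (k : Nat),
    pvFirstDiff s2 l1 k = k + pvFD' (s2.drop k) l1 := by
  intro l1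
  induction l1 with
  | nil => intro k; cases s2.drop k <;> simp [pvFirstDiff, pvFD']
  | cons c rest ih =>
    intro k
    have hget : PySem.List.pyGet? s2 (k : Int) = s2[k]? := by simp [pysem]
    rcases h : s2.drop k with _ | ⟨d, r2⟩
    · simp [pvFirstDiff, pvFD', hget, pvDropNil h]
    · obtain ⟨h0, h1⟩ := pvDropCons h
      simp only [pvFirstDiff, pvFD', hget, h0]
      by_cases hc : c = d
      · simp [hc, ih (k + 1), h1]; omega
      · simp [hc]

-- A's loop equals "spaces in the take-prefix up to B's first-divergence index".
lemma pvMain : ∀ (l1 l2 : List Char) (sp : Int),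
    (l2 <+: l1 → l1.length ≤ l2.length) →
    pvLoopA' l2 l1 sp = sp + ((l1.take (pvFD' l2 l1)).count ' ' : Int) := by
  intro l1
  induction l1 with
  | nil => intro l2 sp _; cases l2 <;> simp [pvLoopA', pvFD']
  | cons c rest ih =>
    intro l2 sp hpre
    rcases l2 with _ | ⟨d, r2⟩
    · exact absurd (hpre (List.nil_prefix)) (by simp)
    · by_cases hc : c = d
      · subst hc
        have hpre' : r2 <+: rest → rest.length ≤ r2.length := by
          intro hp
          have := hpre (List.cons_prefix_cons.mpr ⟨rfl, hp⟩)
          simpa using this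
        simp only [pvLoopA', pvFD', reduceIte]
        rw [ih r2 _ hpre']
        by_cases hs : c = ' '
        · simp [hs]; ring
        · simp [hs]
      · simp [pvLoopA', pvFD', hc]

-- str.count with a one-character needle is the number of occurrences of that character.
lemma pvCountGo_singleton (c : Char) : ∀ (l : List Char) (fuel acc : Nat), l.length ≤ fuel →
    PySem.Chars.count.go [c] fuel l acc = acc + l.count c := by
  intro l
  induction l with
  | nil => intro fuel acc _; cases fuel <;> simp [PySem.Chars.count.go]
  | cons h t ih =>
    intro fuel acc hf
    cases fuel with
    | zero => simp at hf
    | succ f =>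
      have hf' : t.length ≤ f := by simpa using hf
      by_cases hc : h = c
      · simp [PySem.Chars.count.go, hc, ih f (acc + 1) hf']
        omega
      · have hpf : ([c].isPrefixOf (h :: t)) = false := by
          simp [List.isPrefixOf_cons₂]; exact fun hh => absurd hh.symm hc
        simp [PySem.Chars.count.go, hpf, ih f acc hf', hc]

lemma pvCount_singleton (l : List Char) (c : Char) :
    PySem.Chars.count l [c] = l.count c := by
  simp [PySem.Chars.count, pvCountGo_singleton c l l.length 0 le_rfl]

-- ===== VERDICT (by name: the statement is the Claim_ definition above) =====
theorem calculate_words_spec : Claim_equal_calculate_words := by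
  intro s1 s2 _ hpre
  unfold Spec_calculate_words calculate_words calculate_words_alt
  rw [pvLoopA_drop, pvFirstDiff_drop]
  simp only [List.drop_zero, Nat.zero_add]
  have hsl : (PySem.Str.slice s1 none (some ((pvFD' s2.toList s1.toList : Nat) : Int))).toList
      = s1.toList.take (pvFD' s2.toList s1.toList) := by
    simp [pysem, PySem.List.slice_to_natCast]
  rw [PySem.Str.count_eq, hsl]
  have : (" " : String).toList = [' '] := rfl
  rw [this, pvCount_singleton]
  rw [pvMain s1.toList s2.toList 0 hpre]
  simp
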